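-- pv_equiv track=rewrite | github.com/TommyTegra/TripQuick-Database | app.py | reserved
-- ===== SOURCE A (Python) =====
-- def reserved(data):
--     """
--     replaces hmtl reserved characters with html entity names
--     """
--     for item_num, item in enumerate(data):
--         for key in item.keys():
--             if type(item[key]) is str:
--                 data[item_num][key] = item[key].replace("&", "&amp;")
--                 data[item_num][key] = item[key].replace('"', "&quot;")
--                 data[item_num][key] = item[key].replace("'", "&#8217;")  # &#8217 looks like an apostrophe &apos, but a real one messed with the code too much.
--                 data[item_num][key] = item[key].replace("<", "&lt;")
--                 data[item_num][key] = item[key].replace(">", "&gt;")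
--     return data
-- ===== SOURCE B (Python) =====
-- _TABLE = str.maketrans({"&": "&amp;", '"': "&quot;", "'": "&#8217;", "<": "&lt;", ">": "&gt;"})
--
--
-- def reserved(data):
--     # Return-value equivalent to A (A also mutates its argument in place; B builds fresh dicts).
--     return [
--         {key: (value.translate(_TABLE) if type(value) is str else value) for key, value in item.items()}
--         for item in data
--     ]
-- ===== Notes on version B (the rewrite author's own statement) =====
-- stated objective: idiomatic
-- what changed: B precomputes one translation table with str.maketrans and rewrites each string in a single table-driven pass inside a dict comprehension, replacing A's five sequential full-string replace passes with in-place dict mutation; safe because A escapes '&' first so no inserted entity is re-escaped.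
import Mathlib
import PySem

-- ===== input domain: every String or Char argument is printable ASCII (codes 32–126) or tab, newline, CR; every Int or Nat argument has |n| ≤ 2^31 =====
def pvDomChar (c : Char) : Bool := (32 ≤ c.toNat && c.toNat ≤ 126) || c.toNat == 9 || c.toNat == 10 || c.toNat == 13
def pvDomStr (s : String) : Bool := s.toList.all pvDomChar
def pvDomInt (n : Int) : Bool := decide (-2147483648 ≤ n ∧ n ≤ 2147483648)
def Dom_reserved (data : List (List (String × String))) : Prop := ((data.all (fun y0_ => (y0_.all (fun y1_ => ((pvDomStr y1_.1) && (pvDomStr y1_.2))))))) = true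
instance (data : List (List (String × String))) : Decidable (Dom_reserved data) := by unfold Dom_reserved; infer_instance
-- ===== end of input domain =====

-- B replaces A's five sequential str.replace passes by one table-driven pass (str.maketrans/translate);
-- equivalence is about the RETURN value only (A also mutates its argument in place, B builds fresh dicts).

-- ===== PORT A =====
-- A iterates the dicts of `data`; for each key it performs five read-modify-write steps on the dict
-- (each `data[item_num][key] = item[key].replace(...)` reads the CURRENT value, since `item` IS `data[item_num]`).
-- `d.modify k "" f` = `d[k] = f(d.get(k,""))`, exact here because k comes from d.keys (always present).
def reservedStep (d : PySem.Dict String String) (key : String) : PySem.Dict String String :=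
  let d := d.modify key "" (fun v => PySem.Str.replace v "&" "&amp;")
  let d := d.modify key "" (fun v => PySem.Str.replace v "\"" "&quot;")
  let d := d.modify key "" (fun v => PySem.Str.replace v "'" "&#8217;")
  let d := d.modify key "" (fun v => PySem.Str.replace v "<" "&lt;")
  d.modify key "" (fun v => PySem.Str.replace v ">" "&gt;")

def reserved (data : List (List (String × String))) : List (List (String × String)) :=
  data.map (fun item =>
    let d : PySem.Dict String String := PySem.Dict.mk item
    ((PySem.Dict.keys d).foldl reservedStep d).items)

-- ===== PORT B =====
-- the translation table built once by str.maketrans in Source B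
def pvTable (c : Char) : List Char :=
  if c = '&' then "&amp;".toList
  else if c = '"' then "&quot;".toList
  else if c = '\'' then "&#8217;".toList
  else if c = '<' then "&lt;".toList
  else if c = '>' then "&gt;".toList
  else [c]

-- s.translate(_TABLE): one pass over the string through the table
def pvTranslate (s : String) : String := String.ofList (s.toList.flatMap pvTable)

def reserved_alt (data : List (List (String × String))) : List (List (String × String)) :=
  data.map (fun item => item.map (fun p => (p.1, pvTranslate p.2)))

-- ===== PRECONDITION & SPEC =====
-- Pre_ excludes items whose association list carries duplicate keys: a Python dict cannot contain
-- them, so such lists encode no Python input (A's dict-keyed loop would touch only the first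
-- occurrence while B rewrites every pair).
def Pre_reserved (data : List (List (String × String))) : Prop :=
  ∀ item ∈ data, (item.map Prod.fst).Nodup
instance (data : List (List (String × String))) : Decidable (Pre_reserved data) := by unfold Pre_reserved; infer_instance

def pvWitness_reserved : (List (List (String × String))) := [[("a", "x&\"<>'y")], []]

def Spec_reserved (data : List (List (String × String))) (out : List (List (String × String))) : Prop := out = reserved_alt data
instance (data : List (List (String × String))) (out : List (List (String × String))) : Decidable (Spec_reserved data out) := by unfold Spec_reserved; infer_instance

-- ===== CLAIM (what is proved, stated in full; the proofs are below) =====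
def Claim_equal_reserved : Prop := ∀ (data : List (List (String × String))), Dom_reserved data → Pre_reserved data → Spec_reserved data (reserved data)

-- ===== LEMMAS AND PROOFS =====

-- single-character replace is a per-character flatMap
theorem replace_go_single (a : Char) (new : List Char) :
    ∀ (l : List Char) (fuel : Nat) (acc : List Char), l.length ≤ fuel →
      PySem.Chars.replace.go [a] new fuel l acc
        = acc.reverse ++ l.flatMap (fun c => if c = a then new else [c]) := by
  intro l
  induction l with
  | nil =>
    intro fuel acc _
    cases fuel <;> simp [PySem.Chars.replace.go]
  | cons c t ih =>
    intro fuel acc hf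
    cases fuel with
    | zero => simp at hf
    | succ m =>
      by_cases hca : c = a
      · subst hca
        have hpre : List.isPrefixOf [c] (c :: t) = true := by simp [List.isPrefixOf]
        rw [PySem.Chars.replace.go, hpre]
        simp only [if_true, List.length_cons, List.length_nil, List.drop_succ_cons, List.drop_zero,
          Nat.zero_add]
        rw [ih m (new.reverse ++ acc) (by simp at hf; omega)]
        simp
      · have hpre : List.isPrefixOf [a] (c :: t) = false := by
          simp [List.isPrefixOf] ; exact fun h => absurd h.symm hca
        rw [PySem.Chars.replace.go] ; rw [hpre]
        simp only [Bool.false_eq_true, if_false]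
        rw [ih m (c :: acc) (by simp at hf; omega)]
        simp [hca]

theorem replace_single (a : Char) (new s : List Char) :
    PySem.Chars.replace s [a] new = s.flatMap (fun c => if c = a then new else [c]) := by
  rw [PySem.Chars.replace]
  simp only [List.isEmpty_cons, Bool.false_eq_true, if_false]
  simpa using replace_go_single a new s s.length [] (le_refl _)

-- A's five sequential replaces equal B's one-pass table translation, on every string
theorem escA_eq_translate (s : String) :
    PySem.Str.replace (PySem.Str.replace (PySem.Str.replace (PySem.Str.replace
      (PySem.Str.replace s "&" "&amp;") "\"" "&quot;") "'" "&#8217;") "<" "&lt;") ">" "&gt;"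
      = pvTranslate s := by
  have htl : ∀ (t : String) (old new : String),
      (PySem.Str.replace t old new).toList = PySem.Chars.replace t.toList old.toList new.toList := by
    intro t old new; simp [PySem.Str.toList_replace]
  apply String.ext
  simp only [pvTranslate, htl, String.toList_ofList]
  have e1 : "&".toList = ['&'] := rfl
  have e2 : "\"".toList = ['"'] := rfl
  have e3 : "'".toList = ['\''] := rfl
  have e4 : "<".toList = ['<'] := rfl
  have e5 : ">".toList = ['>'] := rfl
  rw [e1, e2, e3, e4, e5]
  simp only [replace_single, List.flatMap_assoc]
  apply List.flatMap_congr
  intro c _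
  by_cases h1 : c = '&'
  · subst h1; decide
  by_cases h2 : c = '"'
  · subst h2; decide
  by_cases h3 : c = '\''
  · subst h3; decide
  by_cases h4 : c = '<'
  · subst h4; decide
  by_cases h5 : c = '>'
  · subst h5; decide
  simp [h1, h2, h3, h4, h5, pvTable]

-- the five modifies at one key collapse to one insert of the fully escaped value
theorem reservedStep_eq (d : PySem.Dict String String) (k : String) :
    reservedStep d k = d.insert k (pvTranslate (d.getD k "")) := by
  simp [reservedStep, PySem.Dict.modify, PySem.Dict.insert_insert_self,
    PySem.Dict.getD_insert_self, escA_eq_translate]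

-- folding the step over the remaining keys escapes exactly the remaining pairs
theorem foldl_step (todo done : List (String × String))
    (h : ((done ++ todo).map Prod.fst).Nodup) :
    (todo.map Prod.fst).foldl reservedStep (PySem.Dict.mk (done ++ todo))
      = PySem.Dict.mk (done ++ todo.map (fun p => (p.1, pvTranslate p.2))) := by
  induction todo generalizing done with
  | nil => simp
  | cons p rest ih =>
    obtain ⟨k, v⟩ := p
    have hnd : ((done ++ (k, v) :: rest).map Prod.fst).Nodup := h
    have hsplit := (List.nodup_append).mp (by simpa using hnd)
    have hkdone : ∀ q ∈ done, q.1 ≠ k := by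
      intro q hq hk
      exact hsplit.2.2 q.1 (List.mem_map_of_mem hq) k List.mem_cons_self hk
    have hkrest : ∀ q ∈ rest, q.1 ≠ k := by
      intro q hq hk
      have h2 := (List.nodup_cons).mp hsplit.2.1
      exact h2.1 (hk ▸ List.mem_map_of_mem hq)
    have hgetD : (PySem.Dict.mk (done ++ (k, v) :: rest)).getD k "" = v := by
      exact PySem.Dict.getD_of_mem_items _ (by simp) (by simpa [PySem.Dict.keys] using hnd) ""
    have hcont : (PySem.Dict.mk (done ++ (k, v) :: rest)).contains k = true := by
      rw [PySem.Dict.contains_iff_mem_keys]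
      simp [PySem.Dict.keys]
    simp only [List.map_cons, List.foldl_cons, reservedStep_eq, hgetD]
    have hmapdone : (done.map fun p => if (p.1 == k) = true then (k, pvTranslate v) else p) = done := by
      conv_rhs => rw [← List.map_id done]
      apply List.map_congr_left
      intro q hq; simp [hkdone q hq]
    have hmaprest : (rest.map fun p => if (p.1 == k) = true then (k, pvTranslate v) else p) = rest := by
      conv_rhs => rw [← List.map_id rest]
      apply List.map_congr_left
      intro q hq; simp [hkrest q hq]
    have hins : (PySem.Dict.mk (done ++ (k, v) :: rest)).insert k (pvTranslate v)
        = PySem.Dict.mk ((done ++ [(k, pvTranslate v)]) ++ rest) := by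
      apply PySem.Dict.ext
      rw [PySem.Dict.items_insert_of_contains _ _ hcont]
      show ((done ++ (k, v) :: rest).map fun p => if (p.1 == k) = true then (k, pvTranslate v) else p)
          = (done ++ [(k, pvTranslate v)]) ++ rest
      rw [List.map_append, List.map_cons, hmapdone, hmaprest]
      simp
    rw [hins, ih (done ++ [(k, pvTranslate v)]) (by simpa using hnd)]
    simp

theorem reserved_spec : Claim_equal_reserved := by
  intro data _ hpre
  unfold Spec_reserved reserved reserved_alt
  apply List.map_congr_left
  intro item hitem
  have hnd : (item.map Prod.fst).Nodup := hpre item hitem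
  have hkeys : PySem.Dict.keys (PySem.Dict.mk item) = item.map Prod.fst := rfl
  simp only [hkeys]
  have := foldl_step item [] (by simpa using hnd)
  simp only [List.nil_append] at this
  rw [this]
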